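-- pv_equiv track=rewrite | github.com/patbarry29/algs-tsp-project | mst/mst.py | make_tour_from_mst
-- ===== SOURCE A (Python) =====
-- def make_tour_from_mst(edges, n):
--     adj = [[] for _ in range(n+1)]
--     for u, v in edges:
--         adj[u].append(v)
--         adj[v].append(u)
--
--     visited = [False] * (n+1)
--     tour = []
--
--     def dfs(v):
--         visited[v] = True
--         tour.append(v)
--         for u in adj[v]:
--             if not visited[u]:
--                 dfs(u)
--
--     dfs(1)
--     tour.append(1)
--     return tour
-- ===== SOURCE B (Python) =====
-- def make_tour_from_mst(edges, n):
--     adj = [[] for _ in range(n+1)]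
--     for u, v in edges:
--         adj[u].append(v)
--         adj[v].append(u)
--
--     visited = [False] * (n+1)
--     tour = []
--     stack = [1]
--     while stack:
--         v = stack.pop()
--         if visited[v]:
--             continue
--         visited[v] = True
--         tour.append(v)
--         stack.extend(reversed(adj[v]))
--
--     tour.append(1)
--     return tour
-- ===== Notes on version B (the rewrite author's own statement) =====
-- stated objective: alternative
-- what changed: The recursive nested-function DFS is replaced by an iterative explicit-stack DFS (check/mark on pop, neighbours pushed in reversed adjacency order) that produces the identical preorder tour without recursion.
import Mathlib
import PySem

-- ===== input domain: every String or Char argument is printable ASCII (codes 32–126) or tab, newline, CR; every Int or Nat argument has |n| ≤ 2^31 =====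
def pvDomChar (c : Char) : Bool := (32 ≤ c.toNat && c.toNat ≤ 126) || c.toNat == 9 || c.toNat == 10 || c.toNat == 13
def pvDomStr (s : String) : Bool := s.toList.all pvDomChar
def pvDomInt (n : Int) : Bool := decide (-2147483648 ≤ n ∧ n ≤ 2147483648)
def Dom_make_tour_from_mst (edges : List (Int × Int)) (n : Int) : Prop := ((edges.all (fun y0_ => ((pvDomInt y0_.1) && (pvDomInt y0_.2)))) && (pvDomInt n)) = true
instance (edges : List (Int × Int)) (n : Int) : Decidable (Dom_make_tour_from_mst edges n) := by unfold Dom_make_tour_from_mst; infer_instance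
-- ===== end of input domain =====

-- B replaces A's recursive nested-function DFS by an explicit-stack iterative DFS
-- (check/mark on pop, neighbours pushed in reversed order); same preorder tour, same cost.

-- ===== PORT A =====
-- shared helper (both Pythons build the adjacency list with the identical loop):
-- adj[u].append(v) is pySetD adj u (pyGetD adj u [] ++ [v]); exact wherever Python does not raise
def pvBuildAdj (edges : List (Int × Int)) (n : Int) : List (List Int) :=
  edges.foldl
    (fun adj uv =>
      let adj1 := PySem.List.pySetD adj uv.1 (PySem.List.pyGetD adj uv.1 [] ++ [uv.2])
      PySem.List.pySetD adj1 uv.2 (PySem.List.pyGetD adj1 uv.2 [] ++ [uv.1]))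
    (List.replicate (n + 1).toNat [])

-- visited[u] read; the default true is only reached where Python raises IndexError (outside Pre_)
def pvVis (vis : List Bool) (u : Int) : Bool := PySem.List.pyGetD vis u true

-- A's nested recursive dfs over the state (visited, tour); the Nat fuel is only a termination
-- guard (explicitly allowed) and is never exhausted for the fuel (n+1).toNat A's port passes.
mutual
def pvDfsA (adj : List (List Int)) : Nat → Int → List Bool × List Int → List Bool × List Int
  | 0, _, s => s
  | f + 1, v, s =>
      pvDfsListA adj f (PySem.List.pyGetD adj v []) (PySem.List.pySetD s.1 v true, s.2 ++ [v])
  termination_by f _ _ => (f, 0)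
def pvDfsListA (adj : List (List Int)) (f : Nat) : List Int → List Bool × List Int → List Bool × List Int
  | [], s => s
  | u :: l, s => if pvVis s.1 u then pvDfsListA adj f l s else pvDfsListA adj f l (pvDfsA adj f u s)
  termination_by l _ => (f, l.length + 1)
end

def make_tour_from_mst (edges : List (Int × Int)) (n : Int) : List Int :=
  let adj := pvBuildAdj edges n
  let s := pvDfsA adj (n + 1).toNat 1 (List.replicate (n + 1).toNat false, [])
  s.2 ++ [1]

-- ===== PORT B =====
-- two termination facts B's while loop cites in decreasing_by:
theorem pvCountSetLt (bs : List Bool) (k : Nat) (h : bs[k]? = some false) :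
    (bs.set k true).count false < bs.count false := by
  induction bs generalizing k with
  | nil => simp at h
  | cons b t ih =>
    cases k with
    | zero =>
      simp at h
      subst h
      simp
    | succ k =>
      simp at h
      have := ih k h
      simp [List.count_cons]
      omega

theorem pvVis_set_count_lt (vis : List Bool) (v : Int) (h : pvVis vis v = false) :
    (PySem.List.pySetD vis v true).count false < vis.count false := by
  unfold pvVis PySem.List.pyGetD PySem.List.pyGet? at h
  unfold PySem.List.pySetD PySem.List.pySet?
  rcases hk : PySem.List.pyIdx? vis.length v with _ | k
  · simp [hk] at h
  · rw [hk] at h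
    rcases hg : vis[k]? with _ | b
    · simp [hg] at h
    · simp [hg] at h
      subst h
      simp only [Option.map_some, Option.getD_some]
      exact pvCountSetLt vis k hg

-- the Lean list's head is the Python stack's top (Python's list end):
-- stack.pop() pops the head, stack.extend(reversed(adj[v])) is adj[v] ++ stk
def pvLoopB (adj : List (List Int)) (s : List Bool × List Int) : List Int → List Int
  | [] => s.2
  | v :: stk =>
      if h : pvVis s.1 v = true then pvLoopB adj s stk
      else pvLoopB adj (PySem.List.pySetD s.1 v true, s.2 ++ [v]) (PySem.List.pyGetD adj v [] ++ stk)
termination_by stk => (s.1.count false, stk.length)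
decreasing_by
  · exact Prod.Lex.right _ (Nat.lt_succ_self _)
  · exact Prod.Lex.left _ _ (pvVis_set_count_lt s.1 v (by simpa using h))

def make_tour_from_mst_alt (edges : List (Int × Int)) (n : Int) : List Int :=
  let adj := pvBuildAdj edges n
  pvLoopB adj (List.replicate (n + 1).toNat false, []) [1] ++ [1]

-- ===== PRECONDITION & SPEC =====
-- Pre_ = exactly the inputs on which the Python A returns normally: dfs starts at node 1
-- (so n ≥ 1, else IndexError on visited[1]) and every edge endpoint is a valid Python index
-- (negative wraparound included) into the (n+1)-element lists (else IndexError on adj[u]).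
def Pre_make_tour_from_mst (edges : List (Int × Int)) (n : Int) : Prop :=
  1 ≤ n ∧ ∀ p ∈ edges, (-(n + 1) ≤ p.1 ∧ p.1 ≤ n) ∧ (-(n + 1) ≤ p.2 ∧ p.2 ≤ n)
instance (edges : List (Int × Int)) (n : Int) : Decidable (Pre_make_tour_from_mst edges n) := by
  unfold Pre_make_tour_from_mst; infer_instance

def pvWitness_make_tour_from_mst : (List (Int × Int)) × Int := ([(1, 2), (2, 3), (1, 0)], 3)

def Spec_make_tour_from_mst (edges : List (Int × Int)) (n : Int) (out : List Int) : Prop := out = make_tour_from_mst_alt edges n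
instance (edges : List (Int × Int)) (n : Int) (out : List Int) : Decidable (Spec_make_tour_from_mst edges n out) := by unfold Spec_make_tour_from_mst; infer_instance

-- ===== CLAIM (what is proved, stated in full; the proofs are below) =====
def Claim_equal_make_tour_from_mst : Prop := ∀ (edges : List (Int × Int)) (n : Int), Dom_make_tour_from_mst edges n → Pre_make_tour_from_mst edges n → Spec_make_tour_from_mst edges n (make_tour_from_mst edges n)

-- ===== LEMMAS AND PROOFS =====

theorem pvCountSetLe (bs : List Bool) (k : Nat) :
    (bs.set k true).count false ≤ bs.count false := by
  induction bs generalizing k with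
  | nil => simp
  | cons b t ih =>
    cases k with
    | zero => cases b <;> simp [List.count_cons]
    | succ k =>
      simp [List.count_cons]
      exact ih k

theorem pvSetD_count_le (vis : List Bool) (v : Int) :
    (PySem.List.pySetD vis v true).count false ≤ vis.count false := by
  unfold PySem.List.pySetD PySem.List.pySet?
  rcases hk : PySem.List.pyIdx? vis.length v with _ | k
  · simp
  · simpa using pvCountSetLe vis k

-- dfs never increases the number of unvisited entries
theorem pvListA_le_of (adj : List (List Int)) (f : Nat)
    (hq : ∀ v s, (pvDfsA adj f v s).1.count false ≤ s.1.count false) :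
    ∀ l s, (pvDfsListA adj f l s).1.count false ≤ s.1.count false := by
  intro l
  induction l with
  | nil => intro s; simp [pvDfsListA]
  | cons u l ih =>
    intro s
    simp only [pvDfsListA]
    split
    · exact ih s
    · exact le_trans (ih _) (hq u s)

theorem pvDfsA_le (adj : List (List Int)) :
    ∀ f v s, (pvDfsA adj f v s).1.count false ≤ s.1.count false := by
  intro f
  induction f with
  | zero => intro v s; simp [pvDfsA]
  | succ f ih =>
    intro v s
    simp only [pvDfsA]
    exact le_trans (pvListA_le_of adj f ih _ _) (pvSetD_count_le s.1 v)

-- main correspondence: the stack loop simulates the recursive dfs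
theorem pvMain (adj : List (List Int)) : ∀ k (s : List Bool × List Int), s.1.count false = k →
    (∀ f v stk, k ≤ f → pvVis s.1 v = false →
        pvLoopB adj s (v :: stk) = pvLoopB adj (pvDfsA adj f v s) stk) ∧
    (∀ f l stk, k ≤ f →
        pvLoopB adj s (l ++ stk) = pvLoopB adj (pvDfsListA adj f l s) stk) := by
  intro k
  induction k using Nat.strong_induction_on with
  | _ k IH =>
    intro s hs
    subst hs
    have ha : ∀ f v stk, s.1.count false ≤ f → pvVis s.1 v = false →
        pvLoopB adj s (v :: stk) = pvLoopB adj (pvDfsA adj f v s) stk := by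
      intro f v stk hf hv
      have hlt := pvVis_set_count_lt s.1 v hv
      obtain ⟨f', rfl⟩ : ∃ f', f = f' + 1 := ⟨f - 1, by omega⟩
      rw [pvLoopB]
      rw [dif_neg (by simp [hv])]
      simp only [pvDfsA]
      exact (IH _ hlt (PySem.List.pySetD s.1 v true, s.2 ++ [v]) rfl).2 f'
        (PySem.List.pyGetD adj v []) stk (by omega)
    refine ⟨ha, ?_⟩
    intro f l stk hf
    induction l with
    | nil => simp [pvDfsListA]
    | cons u l ihl =>
      by_cases hv : pvVis s.1 u = true
      · have h1 : pvLoopB adj s ((u :: l) ++ stk) = pvLoopB adj s (l ++ stk) := by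
          rw [List.cons_append, pvLoopB, dif_pos hv]
        rw [h1, ihl]
        simp only [pvDfsListA, hv, if_pos]
      · have hv' : pvVis s.1 u = false := by simpa using hv
        have h1 : pvLoopB adj s ((u :: l) ++ stk) = pvLoopB adj (pvDfsA adj f u s) (l ++ stk) := by
          rw [List.cons_append]
          exact ha f u (l ++ stk) hf hv'
        have hlt' : (pvDfsA adj f u s).1.count false < s.1.count false := by
          have h2 := pvVis_set_count_lt s.1 u hv'
          obtain ⟨f', rfl⟩ : ∃ f', f = f' + 1 := ⟨f - 1, by omega⟩
          simp only [pvDfsA]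
          exact lt_of_le_of_lt (pvListA_le_of adj f' (pvDfsA_le adj f') _ _) h2
        rw [h1, (IH _ hlt' (pvDfsA adj f u s) rfl).2 f l stk (by omega)]
        simp only [pvDfsListA, hv', if_neg, Bool.false_eq_true, not_false_iff]
    -- end cons

theorem pvVis_replicate_one (m : Nat) (hm : 2 ≤ m) :
    pvVis (List.replicate m false) 1 = false := by
  unfold pvVis PySem.List.pyGetD PySem.List.pyGet? PySem.List.pyIdx?
  have h1 : (1 : Int) < ((List.replicate m false).length : Int) := by
    simp
    omega
  simp [h1, List.getElem?_replicate, show 1 < m by omega]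

-- ===== VERDICT (by name: the statement is the Claim_ definition above) =====
theorem make_tour_from_mst_spec : Claim_equal_make_tour_from_mst := by
  unfold Claim_equal_make_tour_from_mst
  intro edges n _ hpre
  obtain ⟨hn, -⟩ := hpre
  unfold Spec_make_tour_from_mst make_tour_from_mst make_tour_from_mst_alt
  have hm : 2 ≤ (n + 1).toNat := by omega
  have hv1 := pvVis_replicate_one (n + 1).toNat hm
  have hcount : (List.replicate (n + 1).toNat false).count false = (n + 1).toNat := by
    simp [List.count_replicate]
  have h := (pvMain (pvBuildAdj edges n) ((n + 1).toNat)
      (List.replicate (n + 1).toNat false, []) hcount).1 ((n + 1).toNat) 1 [] le_rfl hv1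
  show (pvDfsA (pvBuildAdj edges n) (n + 1).toNat 1 (List.replicate (n + 1).toNat false, [])).2 ++ [1] =
    pvLoopB (pvBuildAdj edges n) (List.replicate (n + 1).toNat false, []) [1] ++ [1]
  rw [h, pvLoopB]
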